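-- pv_equiv track=rewrite | github.com/molmdl/EuL_scripts | EuL2-HSA/prep/readTop.py | sigCmp
-- ===== SOURCE A (Python) =====
-- def sigCmp(a,b):
--  na=len(a)
--  nb=len(b)
--  if na<nb: return -1
--  if na>nb: return 1
--  for i in range(na):
--   if i%3!=2:
--    if a[i]<b[i]: return -1
--    if a[i]>b[i]: return 1
--  return 0
-- ===== SOURCE B (Python) =====
-- def sigCmp(a, b):
--     na, nb = len(a), len(b)
--     if na != nb:
--         return -1 if na < nb else 1
--     res = 0
--     # scan right-to-left, overwriting: the leftmost relevant difference wins
--     for i in range(na - 1, -1, -1):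
--         if i % 3 != 2 and a[i] != b[i]:
--             res = -1 if a[i] < b[i] else 1
--     return res
-- ===== Notes on version B (the rewrite author's own statement) =====
-- stated objective: alternative
-- what changed: Replaces A's early-returning left-to-right scan by a right-to-left pass with an overwriting accumulator (no early exit): each relevant differing index overwrites the result, so the final overwrite - the leftmost relevant difference - decides.
import Mathlib
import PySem

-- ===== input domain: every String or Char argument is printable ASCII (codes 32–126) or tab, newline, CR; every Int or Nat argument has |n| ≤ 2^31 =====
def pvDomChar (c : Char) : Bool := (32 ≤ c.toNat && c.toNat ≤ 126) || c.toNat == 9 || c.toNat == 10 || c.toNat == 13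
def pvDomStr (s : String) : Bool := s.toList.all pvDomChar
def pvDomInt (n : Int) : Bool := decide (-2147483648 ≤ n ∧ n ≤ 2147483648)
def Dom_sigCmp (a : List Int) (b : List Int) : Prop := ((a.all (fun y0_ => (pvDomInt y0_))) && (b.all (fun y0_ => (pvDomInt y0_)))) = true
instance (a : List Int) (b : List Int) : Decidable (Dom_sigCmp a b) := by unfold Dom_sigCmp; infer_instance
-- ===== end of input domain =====

-- B replaces A's early-returning left-to-right scan by a right-to-left pass with an
-- overwriting accumulator (no early exit); the leftmost relevant difference overwrites last.

-- ===== PORT A =====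
-- the loop 'for i in range(na)' as structural recursion over the range list;
-- a[i] is ported as (pyGet? a i).getD 0 — the loop only visits in-range i, so pyGet? is always 'some' there
def sigCmpGo (a : List Int) (b : List Int) : List Int → Int
  | [] => 0
  | i :: rest =>
    if i % 3 ≠ 2 then
      if (PySem.List.pyGet? a i).getD 0 < (PySem.List.pyGet? b i).getD 0 then -1
      else if (PySem.List.pyGet? a i).getD 0 > (PySem.List.pyGet? b i).getD 0 then 1
      else sigCmpGo a b rest
    else sigCmpGo a b rest

def sigCmp (a : List Int) (b : List Int) : Int :=
  let na : Int := a.length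
  let nb : Int := b.length
  if na < nb then -1
  else if na > nb then 1
  else sigCmpGo a b (PySem.List.pyRange 0 na 1)

-- ===== PORT B =====
-- the loop 'for i in range(na-1, -1, -1)' with accumulator 'res', as a foldl over the countdown range
def sigCmp_alt (a : List Int) (b : List Int) : Int :=
  let na : Int := a.length
  let nb : Int := b.length
  if na ≠ nb then (if na < nb then -1 else 1)
  else
    (PySem.List.pyRange (na - 1) (-1) (-1)).foldl
      (fun res i =>
        if i % 3 ≠ 2 ∧ (PySem.List.pyGet? a i).getD 0 ≠ (PySem.List.pyGet? b i).getD 0 then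
          (if (PySem.List.pyGet? a i).getD 0 < (PySem.List.pyGet? b i).getD 0 then -1 else 1)
        else res) 0

-- ===== PRECONDITION & SPEC =====
def Spec_sigCmp (a : List Int) (b : List Int) (out : Int) : Prop := out = sigCmp_alt a b
instance (a : List Int) (b : List Int) (out : Int) : Decidable (Spec_sigCmp a b out) := by unfold Spec_sigCmp; infer_instance

-- ===== CLAIM (what is proved, stated in full; the proofs are below) =====
def Claim_equal_sigCmp : Prop := ∀ (a : List Int) (b : List Int), Dom_sigCmp a b → Spec_sigCmp a b (sigCmp a b)

-- ===== LEMMAS AND PROOFS =====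

-- B's loop step (used only in the proofs)
def sigStep (a b : List Int) (res i : Int) : Int :=
  if i % 3 ≠ 2 ∧ (PySem.List.pyGet? a i).getD 0 ≠ (PySem.List.pyGet? b i).getD 0 then
    (if (PySem.List.pyGet? a i).getD 0 < (PySem.List.pyGet? b i).getD 0 then -1 else 1)
  else res

-- A's loop over range(k, n) equals B's fold over range(n-1, k-1, -1) seeded with 0;
-- proved by downward induction splitting the LAST element (index k) off B's countdown.
theorem sigGo_eq_fold (a b : List Int) :
    ∀ (n : Nat) (k : Int), 0 ≤ k → k + n = a.length →
      sigCmpGo a b (PySem.List.pyRange k (a.length : Int) 1) =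
        (PySem.List.pyRange ((a.length : Int) - 1) (k - 1) (-1)).foldl (sigStep a b) 0 := by
  intro n
  induction n with
  | zero =>
    intro k h0 hk
    rw [PySem.List.pyRange_one_eq_nil (by omega), PySem.List.pyRange_neg_one_eq_nil (by omega)]
    rfl
  | succ n ih =>
    intro k h0 hk
    have hklt : k < (a.length : Int) := by omega
    -- split B's countdown at its end: [n-1, ..., k] = [n-1, ..., k+1] ++ [k]
    have hsnoc : PySem.List.pyRange ((a.length : Int) - 1) (k - 1) (-1)
        = PySem.List.pyRange ((a.length : Int) - 1) k (-1) ++ [k] := by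
      rw [PySem.List.pyRange_neg_one, PySem.List.pyRange_neg_one]
      have h1 : ((a.length : Int) - 1 - (k - 1)).toNat = ((a.length : Int) - 1 - k).toNat + 1 := by omega
      rw [h1, List.range_succ, List.map_append]
      simp
      omega
    rw [PySem.List.pyRange_one_cons hklt, hsnoc, List.foldl_append]
    have hrec := ih (k + 1) (by omega) (by omega)
    have hrw : (k + 1 - 1) = k := by omega
    rw [hrw] at hrec
    -- both sides now recurse on the same tail result
    simp only [sigCmpGo, List.foldl_cons, List.foldl_nil, sigStep]
    rcases lt_trichotomy ((PySem.List.pyGet? a k).getD 0) ((PySem.List.pyGet? b k).getD 0) with h | h | h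
    · by_cases hm : k % 3 ≠ 2
      · simp [hm, h, h.ne]
      · simp [hm, hrec]
    · simp [h, hrec]
    · by_cases hm : k % 3 ≠ 2
      · simp [hm, h.ne', not_lt.mpr h.le, h]
      · simp [hm, hrec]

-- ===== VERDICT (by name: the statement is the Claim_ definition above) =====
theorem sigCmp_spec : Claim_equal_sigCmp := by
  intro a b _
  unfold Spec_sigCmp sigCmp sigCmp_alt
  by_cases h1 : (a.length : Int) < (b.length : Int)
  · simp [h1]; omega
  · by_cases h2 : (a.length : Int) > (b.length : Int)
    · have hne : (a.length : Int) ≠ (b.length : Int) := by omega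
      simp [h1, h2, hne]
    · have hlen : (a.length : Int) = (b.length : Int) := by omega
      simp only [hlen, not_lt.mpr (le_refl _), ne_eq, not_true_eq_false, if_false]
      have := sigGo_eq_fold a b a.length 0 (by omega) (by omega)
      simp only [zero_sub] at this
      rw [← hlen]
      simpa [sigStep] using this
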